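-- pv_equiv track=rewrite | github.com/andjelao/Domaci6 | str05_zad22.py | domine
-- ===== SOURCE A (Python) =====
-- def domine(N):
--     """
--     ulazni parametar : N -> broj tackica na jednoj plocici moze biti broj izmedju 0 i N, ukljucivo
--     returns ukupan broj tackica na svim plocicama u potpunom skupu domina velicine N
--     """
--     x = 0
--     y = 0
--     broj_tackica = 0
--     while x < N and y <= N:
--         if x == y:
--             x = 0
--             y = y + 1
--             broj_tackica = broj_tackica + y + x
--         if y > x:
--             x = x + 1
--             broj_tackica = broj_tackica + x + y
--     return broj_tackica
-- ===== SOURCE B (Python) =====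
-- def domine(N):
--     """Total dots on all dominoes (i,j), 0 <= i <= j <= N, by closed form."""
--     if N < 0:
--         return 0
--     return N * (N + 1) * (N + 2) // 2
-- ===== Notes on version B (the rewrite author's own statement) =====
-- stated objective: faster
-- what changed: Replaced the O(N^2) double-counter while loop with the closed-form formula N*(N+1)*(N+2)//2 (0 for negative N).
import Mathlib
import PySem

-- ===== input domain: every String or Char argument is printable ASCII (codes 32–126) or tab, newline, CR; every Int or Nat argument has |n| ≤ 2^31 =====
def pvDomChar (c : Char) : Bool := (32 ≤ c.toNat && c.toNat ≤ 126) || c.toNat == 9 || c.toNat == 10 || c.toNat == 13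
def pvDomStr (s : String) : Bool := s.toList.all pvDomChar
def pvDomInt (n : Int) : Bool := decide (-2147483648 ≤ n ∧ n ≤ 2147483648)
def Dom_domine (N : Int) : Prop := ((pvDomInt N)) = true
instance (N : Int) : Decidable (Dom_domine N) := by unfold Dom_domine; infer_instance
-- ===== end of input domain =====

-- B replaces A's O(N^2) counting loop with the closed-form N*(N+1)*(N+2)//2 (0 for negative N).


-- ===== PORT A =====
-- the while loop of A, state (x, y, broj_tackica); the two sequential ifs are kept in order.
-- In the branch 'x ≠ y ∧ ¬ y > x' the Python loop body changes nothing and loops forever;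
-- that state is unreachable from the initial state (0,0,0), the port returns acc there.
def domineLoop (N x y acc : Int) : Int :=
  if h : x < N ∧ y ≤ N then
    if hxy : x = y then
      -- x := 0; y := y + 1; acc := acc + y + x  (with the NEW x = 0, y = y+1)
      if hgt : y + 1 > 0 then
        -- second if fires: x := 0 + 1; acc := acc + x + y
        domineLoop N 1 (y + 1) (acc + (y + 1) + 0 + 1 + (y + 1))
      else
        domineLoop N 0 (y + 1) (acc + (y + 1) + 0)
    else if hgt : y > x then
      domineLoop N (x + 1) y (acc + (x + 1) + y)
    else acc
  else acc
termination_by ((N + 1 - y).toNat, (N - x).toNat)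
decreasing_by
  · exact Prod.Lex.left _ _ (by omega)
  · exact Prod.Lex.left _ _ (by omega)
  · exact Prod.Lex.right _ (by omega)

def domine (N : Int) : Int := domineLoop N 0 0 0

-- ===== PORT B =====
def domine_alt (N : Int) : Int :=
  if N < 0 then 0 else PySem.Int.floordiv (N * (N + 1) * (N + 2)) 2

-- ===== PRECONDITION & SPEC =====
def Spec_domine (N : Int) (out : Int) : Prop := out = domine_alt N
instance (N : Int) (out : Int) : Decidable (Spec_domine N out) := by unfold Spec_domine; infer_instance

-- ===== CLAIM (what is proved, stated in full; the proofs are below) =====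
def Claim_equal_domine : Prop := ∀ (N : Int), Dom_domine N → Spec_domine N (domine N)

-- ===== LEMMAS AND PROOFS =====

-- loop invariant: from any reachable state 1 ≤ x ≤ y ≤ N the loop adds exactly the
-- remaining dots (stated doubled to stay division-free)
theorem domineLoop_eq (N x y acc : Int) : 1 ≤ x → x ≤ y → y ≤ N →
    2 * domineLoop N x y acc =
      2 * acc + N * (N + 1) * (N + 2) - (y - 1) * y * (y + 1) - x * (x + 1) - 2 * (x + 1) * y := by
  fun_induction domineLoop N x y acc with
  | case1 y acc hgt h ih =>
    intro h1 h2 h3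
    rw [ih (by omega) (by omega) (by omega)]
    ring
  | case2 y acc hgt h =>
    intro h1 h2 h3
    omega
  | case3 x y acc h hxy hgt ih =>
    intro h1 h2 h3
    rw [ih (by omega) (by omega) h3]
    ring
  | case4 x y acc h hxy hgt =>
    intro h1 h2 h3
    omega
  | case5 x y acc h =>
    intro h1 h2 h3
    have hx : x = N := by omega
    have hy : y = N := by omega
    subst hx; subst hy
    ring

theorem domine_doubled (N : Int) (hN : 0 < N) : 2 * domine N = N * (N + 1) * (N + 2) := by
  unfold domine
  rw [domineLoop]
  have h0 : (0 : Int) < N ∧ (0 : Int) ≤ N := ⟨hN, le_of_lt hN⟩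
  rw [dif_pos h0, dif_pos rfl, dif_pos (by omega : (0 : Int) + 1 > 0)]
  rw [domineLoop_eq N 1 (0 + 1) _ (by omega) (by omega) (by omega)]
  ring

-- ===== VERDICT (by name: the statement is the Claim_ definition above) =====
theorem domine_spec : Claim_equal_domine := by
  intro N _
  unfold Spec_domine domine_alt
  by_cases hN : N < 0
  · rw [if_pos hN]
    unfold domine
    rw [domineLoop]
    rw [dif_neg (by omega)]
  · rw [if_neg hN]
    rw [PySem.Int.floordiv_eq_ediv_of_pos (by omega)]
    rcases lt_or_eq_of_le (not_lt.mp hN) with h | h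
    · rw [← domine_doubled N h, Int.mul_ediv_cancel_left _ (by omega)]
    · subst h
      unfold domine
      rw [domineLoop]
      rw [dif_neg (by omega)]
      decide
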